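-- pv_equiv track=rewrite | github.com/CeeDiii/azure-datafactory-documentation-parser | app/parse.py | _parse_isolated_function_strings
-- ===== SOURCE A (Python) =====
-- from typing import Any, List, Dict
--
-- def _parse_isolated_function_strings(function_strings: List[str]) -> List[str]:
--     """
--     Parses isolated function strings from a list of function strings.
--
--     Parameters:
--     - function_strings (List[str]): List of function strings.
--
--     Returns:
--     List[str]: List of isolated function strings.
--     """
--     single_function_string = ""
--     isolated_function_strings = []
--     for line in function_strings:
--         if "/*" in line and single_function_string != "":
--             isolated_function_strings.append(single_function_string)
--             single_function_string = ""
--         line += "\n"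
--         single_function_string += line
--     isolated_function_strings.append(single_function_string)  # append final string
--     return isolated_function_strings
-- ===== SOURCE B (Python) =====
-- def _parse_isolated_function_strings(function_strings):
--     """Boundary-index decomposition: collect group-start indices, then slice and join."""
--     if not function_strings:
--         return [""]
--     bounds = [0]
--     for i, line in enumerate(function_strings):
--         if i > 0 and "/*" in line:
--             bounds.append(i)
--     bounds.append(len(function_strings))
--     return ["\n".join(function_strings[a:b]) + "\n" for a, b in zip(bounds, bounds[1:])]
-- ===== Notes on version B (the rewrite author's own statement) =====
-- stated objective: alternative
-- what changed: Replaces the streaming string accumulator with a two-pass boundary-index decomposition: first collect group-start indices (0, every i>0 whose line contains '/*', and len as sentinel), then slice each [a:b) chunk and join it with newlines.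
import Mathlib
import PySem

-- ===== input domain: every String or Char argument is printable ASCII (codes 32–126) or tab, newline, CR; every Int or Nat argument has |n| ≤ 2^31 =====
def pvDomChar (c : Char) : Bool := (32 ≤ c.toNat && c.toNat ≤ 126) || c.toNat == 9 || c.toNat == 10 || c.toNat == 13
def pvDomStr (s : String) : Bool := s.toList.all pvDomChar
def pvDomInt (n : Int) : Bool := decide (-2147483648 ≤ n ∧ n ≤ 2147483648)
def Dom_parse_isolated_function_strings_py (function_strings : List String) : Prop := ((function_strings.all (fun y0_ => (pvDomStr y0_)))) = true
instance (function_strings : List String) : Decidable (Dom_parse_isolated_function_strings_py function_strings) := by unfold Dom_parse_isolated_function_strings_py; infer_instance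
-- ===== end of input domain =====

-- B replaces A's streaming accumulator with a boundary-index pass followed by a slice-and-join pass (alternative decomposition, same cost).

-- ===== PORT A =====
def parse_isolated_function_strings_py (function_strings : List String) : List String :=
  let st := function_strings.foldl
    (fun (acc : String × List String) line =>
      let p :=
        if PySem.Str.isIn "/*" line && !(acc.1 == "") then ("", acc.2 ++ [acc.1])
        else (acc.1, acc.2)
      let line := line ++ "\n"
      (p.1 ++ line, p.2))
    ("", [])
  st.2 ++ [st.1]

-- ===== PORT B =====
def parse_isolated_function_strings_py_alt (function_strings : List String) : List String :=
  if function_strings = [] then [""]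
  else
    let bounds : List Int :=
      ((PySem.List.enumerate function_strings 0).foldl
        (fun acc p => if decide (0 < p.1) && PySem.Str.isIn "/*" p.2 then acc ++ [p.1] else acc)
        [0]) ++ [(function_strings.length : Int)]
    (bounds.zip bounds.tail).map
      (fun p => PySem.Str.join "\n" (PySem.List.slice function_strings (some p.1) (some p.2)) ++ "\n")

-- ===== PRECONDITION & SPEC =====
def Spec_parse_isolated_function_strings_py (function_strings : List String) (out : List String) : Prop := out = parse_isolated_function_strings_py_alt function_strings
instance (function_strings : List String) (out : List String) : Decidable (Spec_parse_isolated_function_strings_py function_strings out) := by unfold Spec_parse_isolated_function_strings_py; infer_instance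

-- ===== CLAIM (what is proved, stated in full; the proofs are below) =====
def Claim_equal_parse_isolated_function_strings_py : Prop := ∀ (function_strings : List String), Dom_parse_isolated_function_strings_py function_strings → Spec_parse_isolated_function_strings_py function_strings (parse_isolated_function_strings_py function_strings)

-- ===== LEMMAS AND PROOFS =====

-- one joined group: lines each followed by '\n'
def pvBlock (g : List String) : String := PySem.Str.join "\n" g ++ "\n"

-- mirror of A's loop as structural recursion on the remaining lines
def pvGroups (single : String) : List String → List String
  | [] => [single]
  | l :: rest =>
    if PySem.Str.isIn "/*" l && !(single == "") then
      single :: pvGroups (l ++ "\n") rest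
    else pvGroups (single ++ (l ++ "\n")) rest

-- partition of the tail into line groups, current group cur (nonempty)
def pvSplitGo (cur : List String) : List String → List (List String)
  | [] => [cur]
  | l :: rest => if PySem.Str.isIn "/*" l then cur :: pvSplitGo [l] rest
                 else pvSplitGo (cur ++ [l]) rest

-- indices (starting at s) of lines containing "/*"
def pvMarks : List String → Nat → List Nat
  | [], _ => []
  | l :: rest, s => if PySem.Str.isIn "/*" l then s :: pvMarks rest (s+1) else pvMarks rest (s+1)

-- B's slice-and-join over consecutive boundary pairs, in Nat form
def pvSliceMap (fs : List String) : List Nat → List String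
  | a :: b :: rest => (PySem.Str.join "\n" ((fs.drop a).take (b - a)) ++ "\n") :: pvSliceMap fs (b :: rest)
  | _ => []

theorem pvJoin_snoc (sep y x : List Char) (xs : List (List Char)) :
    PySem.Chars.join sep ((x :: xs) ++ [y]) = PySem.Chars.join sep (x :: xs) ++ sep ++ y := by
  induction xs generalizing x with
  | nil => simp [PySem.Chars.join_cons_cons, PySem.Chars.join_singleton]
  | cons x' xs ih =>
      simp only [List.cons_append, PySem.Chars.join_cons_cons]
      rw [← List.cons_append, ih]
      simp [List.append_assoc]

theorem pvBlock_single (l : String) : pvBlock [l] = l ++ "\n" := by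
  apply String.toList_inj.mp
  simp [pvBlock, PySem.Str.toList_join, PySem.Chars.join_singleton]

theorem pvBlock_snoc (c : String) (cs : List String) (l : String) :
    pvBlock (c :: cs) ++ (l ++ "\n") = pvBlock ((c :: cs) ++ [l]) := by
  apply String.toList_inj.mp
  simp only [String.toList_append, pvBlock, PySem.Str.toList_join, List.map_append, List.map_cons,
    List.map_nil]
  rw [pvJoin_snoc]
  simp [List.append_assoc]

theorem pvBlock_ne (g : List String) : (pvBlock g == "") = false := by
  rw [beq_eq_false_iff_ne]
  intro h
  have h2 := congrArg String.toList h
  simp [pvBlock] at h2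

theorem pvA_loop (rest : List String) (single : String) (iso : List String) :
    (rest.foldl
      (fun (acc : String × List String) line =>
        let p :=
          if PySem.Str.isIn "/*" line && !(acc.1 == "") then ("", acc.2 ++ [acc.1])
          else (acc.1, acc.2)
        let line := line ++ "\n"
        (p.1 ++ line, p.2)) (single, iso)).2
      ++ [(rest.foldl
      (fun (acc : String × List String) line =>
        let p :=
          if PySem.Str.isIn "/*" line && !(acc.1 == "") then ("", acc.2 ++ [acc.1])
          else (acc.1, acc.2)
        let line := line ++ "\n"
        (p.1 ++ line, p.2)) (single, iso)).1]
    = iso ++ pvGroups single rest := by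
  induction rest generalizing single iso with
  | nil => simp [pvGroups]
  | cons l rest ih =>
      simp only [List.foldl_cons, pvGroups]
      by_cases h : (PySem.Str.isIn "/*" l && !(single == "")) = true
      · simp only [h, if_pos]
        rw [ih]
        simp
      · simp only [Bool.not_eq_true] at h
        simp only [h, Bool.false_eq_true, if_false, ih]

theorem pvGroups_block (rest : List String) (c : String) (cs : List String) :
    pvGroups (pvBlock (c :: cs)) rest = (pvSplitGo (c :: cs) rest).map pvBlock := by
  induction rest generalizing c cs with
  | nil => simp [pvGroups, pvSplitGo]
  | cons l rest ih =>
      simp only [pvGroups, pvSplitGo, pvBlock_ne, Bool.not_false, Bool.and_true]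
      by_cases h : PySem.Str.isIn "/*" l = true
      · simp only [h, if_pos, List.map_cons]
        rw [← pvBlock_single, ih]
      · simp only [Bool.not_eq_true] at h
        simp only [h, Bool.false_eq_true, if_false]
        rw [pvBlock_snoc, List.cons_append, ih]

theorem pvMarks_shift (rest : List String) (s k : Nat) :
    pvMarks rest (s + k) = (pvMarks rest s).map (· + k) := by
  induction rest generalizing s with
  | nil => simp [pvMarks]
  | cons l rest ih =>
      simp only [pvMarks]
      by_cases h : PySem.Str.isIn "/*" l = true
      · simp only [h, if_pos, List.map_cons]
        rw [show s + k + 1 = (s + 1) + k by omega, ih]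
      · simp only [Bool.not_eq_true] at h
        simp only [h, Bool.false_eq_true, if_false]
        rw [show s + k + 1 = (s + 1) + k by omega, ih]

theorem pvSliceMap_shift (bs : List Nat) (pre ys : List String) :
    pvSliceMap (pre ++ ys) (bs.map (· + pre.length)) = pvSliceMap ys bs := by
  match bs with
  | [] => simp [pvSliceMap]
  | [a] => simp [pvSliceMap]
  | a :: b :: rest =>
      simp only [List.map_cons, pvSliceMap]
      rw [show (a + pre.length) = pre.length + a by omega, List.drop_append]
      rw [show b + pre.length - (pre.length + a) = b - a by omega]
      refine congrArg₂ List.cons ?_ ?_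
      · rw [List.drop_eq_nil_of_le (by omega : pre.length ≤ pre.length + a)]
        rw [List.nil_append, show pre.length + a - pre.length = a by omega]
      · have := pvSliceMap_shift (b :: rest) pre ys
        simpa using this

theorem pvCore (rest : List String) (c : String) (cs : List String) :
    pvSliceMap ((c :: cs) ++ rest) (0 :: (pvMarks rest (c :: cs).length ++ [(c :: cs).length + rest.length]))
      = (pvSplitGo (c :: cs) rest).map pvBlock := by
  induction rest generalizing c cs with
  | nil =>
      simp [pvMarks, pvSliceMap, pvSplitGo, pvBlock]
  | cons l rest ih =>
      by_cases h : PySem.Str.isIn "/*" l = true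
      · simp only [pvMarks, h, if_pos, pvSplitGo, List.cons_append, List.map_cons]
        simp only [List.cons_append] at *
        show pvSliceMap (c :: (cs ++ l :: rest))
            (0 :: (c :: cs).length :: (pvMarks rest ((c :: cs).length + 1) ++ [(c :: cs).length + (l :: rest).length]))
          = pvBlock (c :: cs) :: (pvSplitGo [l] rest).map pvBlock
        rw [pvSliceMap]
        refine congrArg₂ List.cons ?_ ?_
        · simp [pvBlock, List.take_left']
        · rw [show (c :: (cs ++ l :: rest)) = ((c :: cs) ++ ((l :: []) ++ rest)) by simp]
          have hlist : ((c :: cs).length :: (pvMarks rest ((c :: cs).length + 1) ++ [(c :: cs).length + (l :: rest).length]))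
              = ((0 :: (pvMarks rest (l :: ([] : List String)).length ++ [(l :: ([] : List String)).length + rest.length])).map (· + (c :: cs).length)) := by
            simp only [List.map_cons, List.map_append, List.map_nil, List.length_cons,
              List.length_nil, Nat.zero_add]
            rw [show cs.length + 1 + 1 = 1 + (cs.length + 1) by omega]
            rw [show cs.length + 1 + (rest.length + 1) = 1 + rest.length + (cs.length + 1) by omega]
            rw [pvMarks_shift rest 1 (cs.length + 1)]
          rw [hlist, pvSliceMap_shift]
          exact ih l []
      · simp only [Bool.not_eq_true] at h
        simp only [pvMarks, h, Bool.false_eq_true, if_false, pvSplitGo]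
        have h1 : ((c :: cs) ++ l :: rest) = ((c :: cs) ++ [l]) ++ rest := by simp
        have h2 : (c :: cs).length + 1 = ((c :: cs) ++ [l]).length := by simp
        have h3 : (c :: cs).length + (l :: rest).length = ((c :: cs) ++ [l]).length + rest.length := by
          simp; omega
        rw [h1, h2, h3]
        have := ih c (cs ++ [l])
        simpa using this

theorem pvEnumFilter (rest : List String) (s : Nat) :
    (((PySem.List.enumerate rest ((s : Int) + 1)).filter
        (fun p => decide (0 < p.1) && PySem.Str.isIn "/*" p.2)).map (·.1))
      = (pvMarks rest (s + 1)).map (fun (k : Nat) => (k : Int)) := by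
  induction rest generalizing s with
  | nil => simp [PySem.List.enumerate_nil, pvMarks]
  | cons l rest ih =>
      rw [PySem.List.enumerate_cons]
      have hpos : (decide (0 < (s : Int) + 1)) = true := by simp
      have hstep : (s : Int) + 1 + 1 = ((s + 1 : Nat) : Int) + 1 := by push_cast; ring
      by_cases h : PySem.Str.isIn "/*" l = true
      · simp only [List.filter_cons, hpos, h, Bool.and_self, List.map_cons, pvMarks, if_pos]
        rw [hstep, ih]
        exact congrArg₂ List.cons (by push_cast; ring) rfl
      · simp only [Bool.not_eq_true] at h
        simp only [List.filter_cons, hpos, h, Bool.and_false, pvMarks, Bool.false_eq_true, if_false]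
        rw [hstep, ih]

theorem pvZipSlice (bs : List Nat) (fs : List String) :
    (((bs.map (fun (k : Nat) => (k : Int))).zip (bs.map (fun (k : Nat) => (k : Int))).tail).map
      (fun p => PySem.Str.join "\n" (PySem.List.slice fs (some p.1) (some p.2)) ++ "\n"))
      = pvSliceMap fs bs := by
  match bs with
  | [] => simp [pvSliceMap]
  | [a] => simp [pvSliceMap]
  | a :: b :: rest =>
      simp only [List.map_cons, List.tail_cons, List.zip_cons_cons, pvSliceMap]
      rw [PySem.List.slice_natCast]
      congr 1
      exact pvZipSlice (b :: rest) fs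

-- ===== VERDICT (by name: the statement is the Claim_ definition above) =====
theorem parse_isolated_function_strings_py_spec : Claim_equal_parse_isolated_function_strings_py := by
  intro fs _
  unfold Spec_parse_isolated_function_strings_py
  unfold parse_isolated_function_strings_py parse_isolated_function_strings_py_alt
  match fs with
  | [] => rfl
  | x :: rest =>
      simp only [reduceCtorEq, if_false]
      rw [pvA_loop (x :: rest) "" []]
      rw [PySem.List.foldl_append_if (fun (q : Int × String) => decide (0 < q.1) && PySem.Str.isIn "/*" q.2)
            (fun (q : Int × String) => q.1) (PySem.List.enumerate (x :: rest) 0) [0]]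
      rw [PySem.List.enumerate_cons]
      simp only [List.filter_cons, lt_self_iff_false, decide_false, Bool.false_and,
        Bool.false_eq_true, if_false, zero_add]
      have hEF := pvEnumFilter rest 0
      simp only [Nat.cast_zero, zero_add] at hEF
      have hb : (([(0 : Int)] ++ ((PySem.List.enumerate rest 1).filter
            (fun p => decide (0 < p.1) && PySem.Str.isIn "/*" p.2)).map (fun p => p.1))
            ++ [((x :: rest).length : Int)])
          = ((0 :: (pvMarks rest 1 ++ [(x :: rest).length])).map (fun (k : Nat) => (k : Int))) := by
        rw [hEF]
        simp
      rw [hb, pvZipSlice]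
      have hA : pvGroups "" (x :: rest) = pvGroups (pvBlock (x :: ([] : List String))) rest := by
        rw [pvBlock_single]
        simp only [pvGroups, beq_self_eq_true, Bool.not_true, Bool.and_false, Bool.false_eq_true,
          if_false]
        rw [show ("" ++ (x ++ "\n")) = x ++ "\n" by simp]
      rw [List.nil_append, hA, pvGroups_block]
      have hc := pvCore rest x []
      rw [show ((x :: ([] : List String)) ++ rest) = x :: rest by simp] at hc
      rw [show (x :: ([] : List String)).length = 1 from rfl] at hc
      rw [show (1 : Nat) + rest.length = (x :: rest).length by simp [Nat.add_comm]] at hc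
      exact hc.symm
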